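-- pv_equiv track=rewrite | github.com/N0tT1m/chef-genius-ai | cli/unified_dataset_loader.py | normalize_batch
-- ===== SOURCE A (Python) =====
-- from typing import List, Dict, Any, Iterator, Optional
--
-- def normalize_batch(batch: Dict[str, List[str]], mapping: Dict[str, str]) -> Dict[str, List[str]]:
--     """Normalize a batch to standard field names"""
--
--     normalized = {
--         'titles': [],
--         'ingredients': [],
--         'instructions': []
--     }
--
--     # Map fields based on the dataset's mapping
--     for i in range(len(batch.get('input_ids', []))):
--         # Default values
--         title = "Recipe"
--         ingredients = ""
--         instructions = ""
--
--         # Extract based on mapping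
--         if mapping.get('title') and mapping['title'] in batch:
--             title = batch[mapping['title']][i] if i < len(batch[mapping['title']]) else "Recipe"
--
--         if mapping.get('ingredients') and mapping['ingredients'] in batch:
--             ingredients = batch[mapping['ingredients']][i] if i < len(batch[mapping['ingredients']]) else ""
--
--         if mapping.get('instructions') and mapping['instructions'] in batch:
--             instructions = batch[mapping['instructions']][i] if i < len(batch[mapping['instructions']]) else ""
--
--         # Combine ingredients and instructions if one is missing
--         if not ingredients and instructions:
--             ingredients = "Mixed ingredients"
--         if not instructions and ingredients:
--             instructions = f"Prepare using: {ingredients}"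
--
--         normalized['titles'].append(title)
--         normalized['ingredients'].append(ingredients)
--         normalized['instructions'].append(instructions)
--
--     return normalized
-- ===== SOURCE B (Python) =====
-- def normalize_batch(batch, mapping):
--     """Normalize a batch to standard field names (column-wise decomposition)."""
--
--     def col(key):
--         src = mapping.get(key)
--         if src and src in batch:
--             return batch[src]
--         return None
--
--     def at(column, i, default):
--         if column is not None and i < len(column):
--             return column[i]
--         return default
--
--     n = len(batch.get('input_ids', []))
--     tcol = col('title')
--     gcol = col('ingredients')
--     scol = col('instructions')
--
--     titles = [at(tcol, i, "Recipe") for i in range(n)]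
--     raw_g = [at(gcol, i, "") for i in range(n)]
--     raw_s = [at(scol, i, "") for i in range(n)]
--
--     ings = []
--     insts = []
--     for a, b in zip(raw_g, raw_s):
--         if not a and b:
--             a = "Mixed ingredients"
--         if not b and a:
--             b = "Prepare using: " + a
--         ings.append(a)
--         insts.append(b)
--
--     return {'titles': titles, 'ingredients': ings, 'instructions': insts}
-- ===== Notes on version B (the rewrite author's own statement) =====
-- stated objective: simpler
-- what changed: B resolves the three mapped source columns once up front and builds the output column-wise (three map passes over range(n) plus one zip fusion pass for the cross-fill), instead of A's single row-wise loop that re-resolves the mapping and re-checks membership for every index.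
import Mathlib
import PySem

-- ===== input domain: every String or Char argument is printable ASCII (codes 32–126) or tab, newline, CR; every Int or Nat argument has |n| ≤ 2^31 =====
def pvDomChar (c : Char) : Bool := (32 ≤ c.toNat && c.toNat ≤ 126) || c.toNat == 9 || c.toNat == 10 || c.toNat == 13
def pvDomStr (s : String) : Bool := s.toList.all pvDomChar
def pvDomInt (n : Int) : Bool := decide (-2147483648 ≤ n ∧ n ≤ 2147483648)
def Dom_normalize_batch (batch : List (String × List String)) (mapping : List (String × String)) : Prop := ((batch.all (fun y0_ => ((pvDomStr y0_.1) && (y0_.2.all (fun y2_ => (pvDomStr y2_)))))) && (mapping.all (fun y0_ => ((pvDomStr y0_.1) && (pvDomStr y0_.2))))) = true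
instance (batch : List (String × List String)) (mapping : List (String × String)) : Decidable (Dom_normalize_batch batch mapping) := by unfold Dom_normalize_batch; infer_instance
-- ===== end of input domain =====

-- B resolves each mapped source column once and builds the output column-wise
-- (three map passes plus one fusion pass over a zip) instead of A's single
-- row-wise loop that re-resolves the mapping per index; objective: simpler.

-- ===== PORT A =====
-- loop body of A's single for-loop, kept as a helper (state: titles, ingredients, instructions)
def normalize_batch_body (batch : List (String × List String)) (mapping : List (String × String))
    (acc : List String × List String × List String) (i : Int) :
    List String × List String × List String :=
  let title : String :=
    match (PySem.Dict.mk mapping).get? "title" with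
    | some src =>
        if src ≠ "" ∧ (PySem.Dict.mk batch).contains src = true then
          let c := (PySem.Dict.mk batch).getD src []
          if i < (c.length : Int) then PySem.List.pyGetD c i "Recipe" else "Recipe"
        else "Recipe"
    | none => "Recipe"
  let ingredients : String :=
    match (PySem.Dict.mk mapping).get? "ingredients" with
    | some src =>
        if src ≠ "" ∧ (PySem.Dict.mk batch).contains src = true then
          let c := (PySem.Dict.mk batch).getD src []
          if i < (c.length : Int) then PySem.List.pyGetD c i "" else ""
        else ""
    | none => ""
  let instructions : String :=
    match (PySem.Dict.mk mapping).get? "instructions" with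
    | some src =>
        if src ≠ "" ∧ (PySem.Dict.mk batch).contains src = true then
          let c := (PySem.Dict.mk batch).getD src []
          if i < (c.length : Int) then PySem.List.pyGetD c i "" else ""
        else ""
    | none => ""
  let ingredients := if ingredients = "" ∧ instructions ≠ "" then "Mixed ingredients" else ingredients
  let instructions := if instructions = "" ∧ ingredients ≠ "" then "Prepare using: " ++ ingredients else instructions
  (acc.1 ++ [title], acc.2.1 ++ [ingredients], acc.2.2 ++ [instructions])

def normalize_batch (batch : List (String × List String)) (mapping : List (String × String)) : List (String × List String) :=
  let n : Int := ((PySem.Dict.mk batch).getD "input_ids" []).length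
  let r := (PySem.List.pyRange 0 n 1).foldl (normalize_batch_body batch mapping) ([], [], [])
  [("titles", r.1), ("ingredients", r.2.1), ("instructions", r.2.2)]

-- ===== PORT B =====
-- B helper: resolve one mapping key to its source column, if mapped and present
def nbAlt_col (batch : List (String × List String)) (mapping : List (String × String)) (key : String) : Option (List String) :=
  match (PySem.Dict.mk mapping).get? key with
  | some src => if src ≠ "" then (PySem.Dict.mk batch).get? src else none
  | none => none

-- B helper: column value at index i, with a default
def nbAlt_at (column : Option (List String)) (i : Int) (default : String) : String :=
  match column with
  | some c => if i < (c.length : Int) then PySem.List.pyGetD c i default else default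
  | none => default

-- B helper: the fusion pass (cross-fill of ingredients/instructions)
def nbAlt_fuse (acc : List String × List String) (p : String × String) : List String × List String :=
  let a := p.1
  let b := p.2
  let a := if a = "" ∧ b ≠ "" then "Mixed ingredients" else a
  let b := if b = "" ∧ a ≠ "" then "Prepare using: " ++ a else b
  (acc.1 ++ [a], acc.2 ++ [b])

def normalize_batch_alt (batch : List (String × List String)) (mapping : List (String × String)) : List (String × List String) :=
  let n : Int := ((PySem.Dict.mk batch).getD "input_ids" []).length
  let tcol := nbAlt_col batch mapping "title"
  let gcol := nbAlt_col batch mapping "ingredients"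
  let scol := nbAlt_col batch mapping "instructions"
  let r := PySem.List.pyRange 0 n 1
  let titles := r.map (fun i => nbAlt_at tcol i "Recipe")
  let rawG := r.map (fun i => nbAlt_at gcol i "")
  let rawS := r.map (fun i => nbAlt_at scol i "")
  let fused := (rawG.zip rawS).foldl nbAlt_fuse ([], [])
  [("titles", titles), ("ingredients", fused.1), ("instructions", fused.2)]

-- ===== PRECONDITION & SPEC =====
def Spec_normalize_batch (batch : List (String × List String)) (mapping : List (String × String)) (out : List (String × List String)) : Prop := out = normalize_batch_alt batch mapping
instance (batch : List (String × List String)) (mapping : List (String × String)) (out : List (String × List String)) : Decidable (Spec_normalize_batch batch mapping out) := by unfold Spec_normalize_batch; infer_instance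

-- ===== CLAIM (what is proved, stated in full; the proofs are below) =====
def Claim_equal_normalize_batch : Prop := ∀ (batch : List (String × List String)) (mapping : List (String × String)), Dom_normalize_batch batch mapping → Spec_normalize_batch batch mapping (normalize_batch batch mapping)

-- ===== LEMMAS AND PROOFS =====

-- A's per-index field value equals B's column-resolved one
theorem nbAlt_at_col (batch : List (String × List String)) (mapping : List (String × String))
    (key : String) (i : Int) (d : String) :
    nbAlt_at (nbAlt_col batch mapping key) i d =
      (match (PySem.Dict.mk mapping).get? key with
       | some src =>
           if src ≠ "" ∧ (PySem.Dict.mk batch).contains src = true then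
             let c := (PySem.Dict.mk batch).getD src []
             if i < (c.length : Int) then PySem.List.pyGetD c i d else d
           else d
       | none => d) := by
  unfold nbAlt_at nbAlt_col
  cases hm : (PySem.Dict.mk mapping).get? key with
  | none => rfl
  | some src =>
      by_cases hs : src = ""
      · simp [hs]
      · cases hb : (PySem.Dict.mk batch).get? src with
        | none =>
            simp [hs, PySem.Dict.contains_eq_isSome_get?, hb]
        | some c =>
            simp [hs, PySem.Dict.contains_eq_isSome_get?, hb,
                  PySem.Dict.getD_eq_get?_getD]

-- A's fold with a triple accumulator, in closed (map) form
theorem foldl_triple (fT fG fS : Int → String) (l : List Int) (t g s : List String) :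
    l.foldl (fun acc i => (acc.1 ++ [fT i], acc.2.1 ++ [fG i], acc.2.2 ++ [fS i])) (t, g, s)
      = (t ++ l.map fT, g ++ l.map fG, s ++ l.map fS) := by
  induction l generalizing t g s with
  | nil => simp
  | cons x xs ih => simp [List.foldl_cons, ih]

-- B's fusion fold over a mapped list, in closed (map) form
theorem foldl_fuse (fG fS : Int → String) (l : List Int) (g s : List String) :
    (l.map (fun i => (fG i, fS i))).foldl nbAlt_fuse (g, s)
      = (g ++ l.map (fun i => (nbAlt_fuse ([], []) (fG i, fS i)).1.headI),
         s ++ l.map (fun i => (nbAlt_fuse ([], []) (fG i, fS i)).2.headI)) := by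
  induction l generalizing g s with
  | nil => simp
  | cons x xs ih =>
      simp only [List.map_cons, List.foldl_cons, ih, nbAlt_fuse]
      simp

theorem normalize_batch_spec : Claim_equal_normalize_batch := by
  intro batch mapping _
  unfold Spec_normalize_batch normalize_batch normalize_batch_alt
  simp only [List.zip_map']
  rw [foldl_fuse]
  have hbody : normalize_batch_body batch mapping =
      (fun acc i =>
        (acc.1 ++ [nbAlt_at (nbAlt_col batch mapping "title") i "Recipe"],
         acc.2.1 ++ [(nbAlt_fuse ([], []) (nbAlt_at (nbAlt_col batch mapping "ingredients") i "",
                       nbAlt_at (nbAlt_col batch mapping "instructions") i "")).1.headI],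
         acc.2.2 ++ [(nbAlt_fuse ([], []) (nbAlt_at (nbAlt_col batch mapping "ingredients") i "",
                       nbAlt_at (nbAlt_col batch mapping "instructions") i "")).2.headI])) := by
    funext acc i
    simp only [normalize_batch_body, nbAlt_fuse, nbAlt_at_col]
    rfl
  rw [hbody, foldl_triple]
  simp
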